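-- pv_equiv track=rewrite | github.com/DeborahPerez/BioInformatics_I | common_genfns.py | clumpfinder
-- ===== SOURCE A (Python) =====
-- def count_kmers(code,kmer):
--     count=0
--     codelen=len(code)+1
--     kmerlen=len(kmer)
--     for n in range(0,codelen-kmerlen,1):
--         currpart=code[n:n+len(kmer)]
--         if currpart==kmer:
--             count=count+1
--     return count
--
-- def wordfrequency(gene,size):
--     mxcount=0
--     counter=dict()
--     result=list()
--     codelen=len(gene)+1
--     for n in range(0,codelen-size,1):
--         kmer=gene[n:n+size]
--         if counter.get(kmer, 0)==0:
--             counter[kmer]=count_kmers(gene,kmer)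
--     return counter
--
-- def clumpfinder(gene,clumpsize,windowsize,minscore):
--     result=dict()
--     order=0
--     codelen=len(gene)+1
--     for n in range(0,codelen-windowsize,1):
--         partition=gene[n:n+windowsize]
--         tmp=wordfrequency(partition,clumpsize)
--         for m in tmp:
--             if tmp[m]>=minscore:
--                 if result.get(m, 0)==0:
--                     result[m]=order
--                     order=order+1
--     parsedresult=list()
--     for n in range(0,len(result)):
--         parsedresult.append('0')
--     for n in result:
--         parsedresult[result[n]-1]=str(n)
--     parsedresult.sort()
--     return parsedresult
-- ===== SOURCE B (Python) =====
-- def clumpfinder(gene, clumpsize, windowsize, minscore):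
--     # One pass per window with a count dict (no per-kmer rescans),
--     # collecting qualifying k-mers in a set; return value only (A mutates nothing).
--     found = set()
--     for n in range(0, len(gene) + 1 - windowsize):
--         window = gene[n:n + windowsize]
--         counts = {}
--         for j in range(0, len(window) + 1 - clumpsize):
--             kmer = window[j:j + clumpsize]
--             counts[kmer] = counts.get(kmer, 0) + 1
--         for kmer, c in counts.items():
--             if c >= minscore:
--                 found.add(kmer)
--     return sorted(found)
-- ===== Notes on version B (the rewrite author's own statement) =====
-- stated objective: alternative
-- what changed: Per window B builds a count dict of all window k-mers in one pass and collects qualifying k-mers into a set that is sorted once at the end, replacing A's per-kmer count_kmers rescans and its order-dict/placeholder-list reconstruction; Pre_ restricts to the natural domain clumpsize >= 0 (a k-mer length), since for negative clumpsize A's variable-length slices make its substring recount disagree with any fixed-window extraction count.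
-- outside the precondition, e.g. on clumpfinder('abab', -2, 4, 2): A returns ['', 'ab'], B returns ['']
import Mathlib
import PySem

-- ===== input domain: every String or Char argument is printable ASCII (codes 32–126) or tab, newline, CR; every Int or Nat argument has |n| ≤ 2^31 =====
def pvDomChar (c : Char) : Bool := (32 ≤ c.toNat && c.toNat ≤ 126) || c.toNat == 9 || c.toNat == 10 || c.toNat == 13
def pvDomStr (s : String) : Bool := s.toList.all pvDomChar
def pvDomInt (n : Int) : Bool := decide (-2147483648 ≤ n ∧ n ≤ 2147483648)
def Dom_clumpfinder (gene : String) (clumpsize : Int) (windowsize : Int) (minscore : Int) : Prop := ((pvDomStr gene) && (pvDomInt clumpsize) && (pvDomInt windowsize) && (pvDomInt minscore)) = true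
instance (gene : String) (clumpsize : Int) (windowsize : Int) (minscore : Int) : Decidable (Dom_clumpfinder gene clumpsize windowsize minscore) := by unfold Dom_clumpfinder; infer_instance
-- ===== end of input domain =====

-- B replaces A's per-k-mer rescans (count_kmers) with one count dict per window and A's
-- order-dict/placeholder-list reconstruction with a set sorted once at the end; return value only.

-- ===== PORT A =====
-- Strings are handled on their code-point lists (the PySem.Chars convention); Python's str
-- order is code-point lexicographic = Lean's `<` on the char lists, so the final sort is exact.
def countKmers (code kmer : List Char) : Int :=
  (PySem.List.pyRange 0 ((code.length : Int) + 1 - (kmer.length : Int)) 1).foldl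
    (fun count n =>
      let currpart := PySem.List.slice code (some n) (some (n + (kmer.length : Int)))
      if currpart == kmer then count + 1 else count) 0

def wordfrequency (gene : List Char) (size : Int) : PySem.Dict (List Char) Int :=
  (PySem.List.pyRange 0 ((gene.length : Int) + 1 - size) 1).foldl
    (fun counter n =>
      let kmer := PySem.List.slice gene (some n) (some (n + size))
      if counter.getD kmer 0 == 0 then counter.insert kmer (countKmers gene kmer) else counter)
    PySem.Dict.empty

def clumpfinder (gene : String) (clumpsize : Int) (windowsize : Int) (minscore : Int) : List String :=
  let g := gene.toList
  let st := (PySem.List.pyRange 0 ((g.length : Int) + 1 - windowsize) 1).foldl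
    (fun (st : PySem.Dict (List Char) Int × Int) n =>
      let partition := PySem.List.slice g (some n) (some (n + windowsize))
      let tmp := wordfrequency partition clumpsize
      -- `for m in tmp` iterates the dict's keys; `tmp[m]` is an exact getD since m is a key
      tmp.keys.foldl (fun st m =>
        if tmp.getD m 0 ≥ minscore then
          if st.1.getD m 0 == 0 then (st.1.insert m st.2, st.2 + 1) else st
        else st) st)
    (PySem.Dict.empty, 0)
  let result := st.1
  let parsedresult : List (List Char) :=
    (PySem.List.pyRange 0 (result.items.length : Int) 1).foldl (fun acc _ => acc ++ [['0']]) []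
  -- `parsedresult[result[n]-1] = str(n)`: Python never raises here (every index lands in
  -- range, possibly -1 = last slot); pySetD is exact wherever Python returns
  let parsedresult := result.keys.foldl (fun acc m => PySem.List.pySetD acc (result.getD m 0 - 1) m) parsedresult
  (PySem.List.sorted parsedresult (fun x => x) false).map (fun l => String.ofList l)

-- ===== PORT B =====
def clumpfinder_alt (gene : String) (clumpsize : Int) (windowsize : Int) (minscore : Int) : List String :=
  let g := gene.toList
  let found := (PySem.List.pyRange 0 ((g.length : Int) + 1 - windowsize) 1).foldl
    (fun (found : PySem.Set (List Char)) n =>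
      let window := PySem.List.slice g (some n) (some (n + windowsize))
      let counts := (PySem.List.pyRange 0 ((window.length : Int) + 1 - clumpsize) 1).foldl
        (fun (d : PySem.Dict (List Char) Int) j =>
          let kmer := PySem.List.slice window (some j) (some (j + clumpsize))
          d.insert kmer (d.getD kmer 0 + 1)) PySem.Dict.empty
      counts.items.foldl (fun s p => if p.2 ≥ minscore then PySem.Set.add s p.1 else s) found)
    PySem.Set.empty
  (PySem.List.sorted found (fun x => x) false).map (fun l => String.ofList l)

-- ===== PRECONDITION & SPEC =====
-- Pre_ excludes negative clumpsize (a k-mer length): there A slices variable-length pieces and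
-- its substring recount disagrees with any fixed-window extraction count; A still returns there.
def Pre_clumpfinder (gene : String) (clumpsize : Int) (windowsize : Int) (minscore : Int) : Prop :=
  0 ≤ clumpsize
instance (gene : String) (clumpsize : Int) (windowsize : Int) (minscore : Int) : Decidable (Pre_clumpfinder gene clumpsize windowsize minscore) := by unfold Pre_clumpfinder; infer_instance

def pvWitness_clumpfinder : String × Int × Int × Int := ("aaaa", 1, 2, 2)

def Spec_clumpfinder (gene : String) (clumpsize : Int) (windowsize : Int) (minscore : Int) (out : List String) : Prop := out = clumpfinder_alt gene clumpsize windowsize minscore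
instance (gene : String) (clumpsize : Int) (windowsize : Int) (minscore : Int) (out : List String) : Decidable (Spec_clumpfinder gene clumpsize windowsize minscore out) := by unfold Spec_clumpfinder; infer_instance

-- ===== CLAIM (what is proved, stated in full; the proofs are below) =====
def Claim_equal_clumpfinder : Prop := ∀ (gene : String) (clumpsize : Int) (windowsize : Int) (minscore : Int), Dom_clumpfinder gene clumpsize windowsize minscore → Pre_clumpfinder gene clumpsize windowsize minscore → Spec_clumpfinder gene clumpsize windowsize minscore (clumpfinder gene clumpsize windowsize minscore)

-- ===== LEMMAS AND PROOFS =====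

-- the k-mers extracted from a window W
def kmersOf (W : List Char) (cs : Int) : List (List Char) :=
  (PySem.List.pyRange 0 ((W.length : Int) + 1 - cs) 1).map
    (fun j => PySem.List.slice W (some j) (some (j + cs)))

theorem length_mem_kmersOf (W : List Char) (cs : Int) (hcs : 0 ≤ cs)
    (k : List Char) (hk : k ∈ kmersOf W cs) : (k.length : Int) = cs := by
  unfold kmersOf at hk
  rw [List.mem_map] at hk
  obtain ⟨j, hj, rfl⟩ := hk
  rw [PySem.List.mem_pyRange_one] at hj
  rw [PySem.List.slice_toNat W hj.1 (by omega)]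
  simp only [List.length_take, List.length_drop]
  omega

theorem countKmers_eq_count (W : List Char) (cs : Int)
    (k : List Char) (hlen : (k.length : Int) = cs) :
    countKmers W k = ((kmersOf W cs).count k : Int) := by
  have h := PySem.List.foldl_beq_add_one (kmersOf W cs) k 0
  unfold kmersOf at h
  rw [List.foldl_map] at h
  unfold countKmers
  rw [hlen]
  simpa using h

theorem counts_eq_counter (W : List Char) (cs : Int) :
    (PySem.List.pyRange 0 ((W.length : Int) + 1 - cs) 1).foldl
        (fun (d : PySem.Dict (List Char) Int) j =>
          d.insert (PySem.List.slice W (some j) (some (j + cs))) (d.getD (PySem.List.slice W (some j) (some (j + cs))) 0 + 1))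
        PySem.Dict.empty
      = PySem.Dict.counter (kmersOf W cs) := by
  rw [← PySem.Dict.foldl_insert_getD_add_one_eq_counter (kmersOf W cs)]
  unfold kmersOf
  rw [List.foldl_map]


theorem find?_map_self {ν : Type} (S : List (List Char)) (v : List Char → ν) (k : List Char) :
    (S.map (fun a => (a, v a))).find? (fun p => p.1 == k)
      = if k ∈ S then some (k, v k) else none := by
  induction S with
  | nil => simp
  | cons a t ih =>
    by_cases hak : a = k
    · subst hak; simp
    · rw [List.map_cons, List.find?_cons_of_neg (by simp [hak]), ih]
      simp [Ne.symm hak]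

theorem getD_items_map {ν : Type} (d : PySem.Dict (List Char) ν) (S : List (List Char)) (v : List Char → ν) (d0 : ν)
    (h : d.items = S.map (fun k => (k, v k))) (k : List Char) :
    d.getD k d0 = if k ∈ S then v k else d0 := by
  simp only [PySem.Dict.getD, PySem.Dict.get?, h, find?_map_self]
  split <;> simp

theorem contains_items_map {ν : Type} (d : PySem.Dict (List Char) ν) (S : List (List Char)) (v : List Char → ν)
    (h : d.items = S.map (fun k => (k, v k))) (k : List Char) :
    d.contains k = decide (k ∈ S) := by
  induction S generalizing d with
  | nil => simp [PySem.Dict.contains, h]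
  | cons a t ih =>
    by_cases hak : a = k
    · subst hak; simp [PySem.Dict.contains, h]
    · simp only [PySem.Dict.contains, h, List.map_cons, List.any_cons] at *
      have := ih (PySem.Dict.mk (t.map (fun k => (k, v k)))) rfl
      simp only [PySem.Dict.contains] at this
      simp [hak, this, Ne.symm hak]

theorem condInsert_items (xs : List (List Char)) (v : List Char → Int)
    (hv : ∀ k ∈ xs, v k ≠ 0) :
    (xs.foldl (fun d k => if d.getD k 0 == 0 then d.insert k (v k) else d) PySem.Dict.empty).items
      = (PySem.Set.ofList xs).map (fun k => (k, v k)) := by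
  induction xs using List.reverseRecOn with
  | nil => simp [PySem.Dict.empty, PySem.Set.ofList]
  | append_singleton l a ih =>
    have hvl : ∀ k ∈ l, v k ≠ 0 := fun k hk => hv k (by simp [hk])
    rw [List.foldl_append]
    set d := l.foldl (fun d k => if d.getD k 0 == 0 then d.insert k (v k) else d) PySem.Dict.empty with hd
    have hitems := ih hvl
    have hof : PySem.Set.ofList (l ++ [a]) = PySem.Set.add (PySem.Set.ofList l) a := by
      simp [PySem.Set.ofList, PySem.Set.ofList_eq_foldl, List.foldl_append]
    rw [List.foldl_cons, List.foldl_nil, hof]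
    by_cases hmem : a ∈ PySem.Set.ofList l
    · have hg : d.getD a 0 = v a := by rw [getD_items_map d _ v 0 hitems a, if_pos hmem]
      have hva : v a ≠ 0 := hv a (by simp [(PySem.Set.mem_ofList l a).1 hmem])
      rw [hg]
      simp only [beq_iff_eq, if_neg hva]
      rw [hitems, PySem.Set.add, if_pos ((PySem.Set.contains_iff _ a).2 hmem)]
    · have hg : d.getD a 0 = 0 := by rw [getD_items_map d _ v 0 hitems a, if_neg hmem]
      have hcont : d.contains a = false := by
        rw [contains_items_map d _ v hitems a]; simp [hmem]
      rw [hg]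
      simp only [beq_self_eq_true, if_pos]
      rw [PySem.Dict.insert, hcont]
      simp only [Bool.false_eq_true, if_neg, hitems]
      rw [PySem.Set.add]
      have : ¬ ((PySem.Set.ofList l).contains a = true) := fun hc => hmem ((PySem.Set.contains_iff _ a).1 hc)
      rw [if_neg this]
      simp


theorem dict_contains_iff_mem_keys (d : PySem.Dict (List Char) Int) (m : List Char) :
    d.contains m = true ↔ m ∈ d.keys := by
  simp [PySem.Dict.contains, PySem.Dict.keys, List.any_eq_true, List.mem_map]

theorem dict_keys_insert_of_contains (d : PySem.Dict (List Char) Int) (m : List Char) (v : Int)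
    (h : d.contains m = true) : (d.insert m v).keys = d.keys := by
  simp only [PySem.Dict.insert, h, if_pos, PySem.Dict.keys, List.map_map]
  apply List.map_congr_left
  intro p _
  by_cases hp : p.1 = m <;> simp [hp]

theorem dict_insert_of_not_contains (d : PySem.Dict (List Char) Int) (m : List Char) (v : Int)
    (h : d.contains m = false) : (d.insert m v).items = d.items ++ [(m, v)] := by
  simp [PySem.Dict.insert, h]

theorem dict_getD_of_not_contains (d : PySem.Dict (List Char) Int) (m : List Char)
    (h : d.contains m = false) : d.getD m 0 = 0 := by
  simp only [PySem.Dict.contains, List.any_eq_false] at h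
  have : d.items.find? (fun p => p.1 == m) = none := List.find?_eq_none.2 h
  simp [PySem.Dict.getD, PySem.Dict.get?, this]

theorem dict_get?_isSome_of_contains (d : PySem.Dict (List Char) Int) (m : List Char)
    (h : d.contains m = true) : ∃ w, d.get? m = some w := by
  simp only [PySem.Dict.contains] at h
  simp only [PySem.Dict.get?]
  cases hf : d.items.find? (fun p => p.1 == m) with
  | none =>
    rw [List.find?_eq_none] at hf
    rw [List.any_eq_true] at h
    obtain ⟨p, hp, he⟩ := h
    exact absurd he (by simpa using hf p hp)
  | some p => exact ⟨p.2, by simp⟩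

theorem dict_decomp (d : PySem.Dict (List Char) Int) (m : List Char) (w : Int)
    (hnd : d.keys.Nodup) (h : d.get? m = some w) :
    ∃ pre suf, d.items = pre ++ (m, w) :: suf ∧ (∀ p ∈ pre, p.1 ≠ m) ∧ (∀ p ∈ suf, p.1 ≠ m) := by
  simp only [PySem.Dict.get?] at h
  obtain ⟨p, hfind, hp2⟩ : ∃ p, d.items.find? (fun p => p.1 == m) = some p ∧ p.2 = w := by
    cases hf : d.items.find? (fun p => p.1 == m) with
    | none => simp [hf] at h
    | some p => exact ⟨p, rfl, by simpa [hf] using h⟩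
  obtain ⟨hpm, pre, suf, hsplit, hpre⟩ := List.find?_eq_some_iff_append.mp hfind
  have hpm' : p.1 = m := by simpa using hpm
  refine ⟨pre, suf, by rw [hsplit, ← hp2, ← hpm'], ?_, ?_⟩
  · intro q hq; have := hpre q hq; simpa using this
  · intro q hq hqm
    simp only [PySem.Dict.keys, hsplit, List.map_append, List.map_cons] at hnd
    have h2 := (List.nodup_append.mp hnd).2.1
    rw [List.nodup_cons] at h2
    exact h2.1 (by rw [← hpm'] at hqm; exact hqm ▸ List.mem_map_of_mem hq)

theorem dict_insert_inplace (d : PySem.Dict (List Char) Int) (m : List Char) (w v : Int)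
    (pre suf : List (List Char × Int)) (hsplit : d.items = pre ++ (m, w) :: suf)
    (hpre : ∀ p ∈ pre, p.1 ≠ m) (hsuf : ∀ p ∈ suf, p.1 ≠ m) (hc : d.contains m = true) :
    (d.insert m v).items = pre ++ (m, v) :: suf ∧ (d.insert m v).keys = d.keys := by
  refine ⟨?_, dict_keys_insert_of_contains _ _ _ hc⟩
  simp only [PySem.Dict.insert, hc, if_pos, hsplit, List.map_append, List.map_cons]
  congr 1
  · apply (List.map_congr_left ?_).trans (List.map_id _)
    intro p hp; simp [hpre p hp]
  · congr 1
    · simp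
    · apply (List.map_congr_left ?_).trans (List.map_id _)
      intro p hp
      simp [hsuf p hp]

def INV (st : PySem.Dict (List Char) Int × Int) : Prop :=
  st.1.keys.Nodup ∧
    ((st.1.values.Perm (PySem.List.pyRange 0 (st.1.items.length : Int) 1) ∧ st.2 = (st.1.items.length : Int)) ∨
     (st.1.values.Perm (PySem.List.pyRange 1 ((st.1.items.length : Int) + 1) 1) ∧ st.2 = (st.1.items.length : Int) + 1))

def stepA (st : PySem.Dict (List Char) Int × Int) (m : List Char) : PySem.Dict (List Char) Int × Int :=
  if st.1.getD m 0 == 0 then (st.1.insert m st.2, st.2 + 1) else st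

theorem stepA_keys (st : PySem.Dict (List Char) Int × Int) (m : List Char) :
    (stepA st m).1.keys = PySem.Set.add st.1.keys m := by
  unfold stepA
  by_cases hc : st.1.contains m = true
  · have hmem : m ∈ st.1.keys := (dict_contains_iff_mem_keys _ _).1 hc
    have hadd : PySem.Set.add st.1.keys m = st.1.keys := by
      rw [PySem.Set.add, if_pos ((PySem.Set.contains_iff _ m).2 hmem)]
    rw [hadd]
    by_cases hz : st.1.getD m 0 = 0
    · simp only [hz, beq_self_eq_true, if_pos]
      exact dict_keys_insert_of_contains _ _ _ hc
    · simp [hz]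
  · have hc' : st.1.contains m = false := by simpa using hc
    have hz := dict_getD_of_not_contains _ _ hc'
    have hmem : m ∉ st.1.keys := fun hm => by simp [(dict_contains_iff_mem_keys _ _).2 hm] at hc
    simp only [hz, beq_self_eq_true, if_pos]
    rw [PySem.Set.add, if_neg (fun hcm => hmem ((PySem.Set.contains_iff _ m).1 hcm))]
    simp [PySem.Dict.keys, dict_insert_of_not_contains _ _ _ hc']

theorem stepA_INV (st : PySem.Dict (List Char) Int × Int) (m : List Char) (h : INV st) :
    INV (stepA st m) := by
  obtain ⟨hnd, hcase⟩ := h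
  unfold stepA
  by_cases hc : st.1.contains m = true
  · obtain ⟨w, hw⟩ := dict_get?_isSome_of_contains _ _ hc
    have hgd : st.1.getD m 0 = w := by simp [PySem.Dict.getD, hw]
    by_cases hz : w = 0
    · subst hz
      simp only [hgd, beq_self_eq_true, if_pos]
      obtain ⟨pre, suf, hsplit, hpre, hsuf⟩ := dict_decomp _ _ _ hnd hw
      obtain ⟨hitems', hkeys'⟩ := dict_insert_inplace st.1 m 0 st.2 pre suf hsplit hpre hsuf hc
      have hvals : st.1.values = pre.map (·.2) ++ 0 :: suf.map (·.2) := by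
        simp [PySem.Dict.values, hsplit]
      have hvals' : (st.1.insert m st.2).values = pre.map (·.2) ++ st.2 :: suf.map (·.2) := by
        simp [PySem.Dict.values, hitems']
      have hlen : (st.1.insert m st.2).items.length = st.1.items.length := by
        rw [hitems', hsplit]; simp
      have h0mem : (0 : Int) ∈ st.1.values := by rw [hvals]; simp
      rcases hcase with ⟨hv, hord⟩ | ⟨hv, hord⟩
      · -- case 1 → case 2
        have h0r : (0 : Int) ∈ PySem.List.pyRange 0 (st.1.items.length : Int) 1 := hv.mem_iff.mp h0mem
        have hKpos : (0 : Int) < (st.1.items.length : Int) := (PySem.List.mem_pyRange_one.mp h0r).2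
        have hcons : PySem.List.pyRange 0 (st.1.items.length : Int) 1
            = 0 :: PySem.List.pyRange 1 (st.1.items.length : Int) 1 := by
          simpa using PySem.List.pyRange_one_cons hKpos
        have hrest : (pre.map (·.2) ++ suf.map (·.2)).Perm (PySem.List.pyRange 1 (st.1.items.length : Int) 1) := by
          have h1 : ((0 : Int) :: (pre.map (·.2) ++ suf.map (·.2))).Perm st.1.values := by
            rw [hvals]; exact List.perm_middle.symm
          have h2 : st.1.values.Perm ((0 : Int) :: PySem.List.pyRange 1 (st.1.items.length : Int) 1) := by
            rw [← hcons]; exact hv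
          exact List.Perm.cons_inv (h1.trans h2)
        constructor
        · rw [hkeys']; exact hnd
        · right
          constructor
          · have p1 : (st.1.insert m st.2).values.Perm (st.2 :: (pre.map (·.2) ++ suf.map (·.2))) := by
              rw [hvals']; exact List.perm_middle
            have p2 := p1.trans (hrest.cons st.2)
            rw [hlen]
            have hs := PySem.List.pyRange_one_succ_right (a := 1) (b := (st.1.items.length : Int)) (by omega)
            rw [hs]
            refine p2.trans ?_
            rw [← hord]
            exact (List.perm_append_singleton _ _).symm
          · rw [hlen, hord]
      · -- case 2 impossible: 0 ∈ values but range starts at 1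
        exfalso
        have := PySem.List.mem_pyRange_one.mp (hv.mem_iff.mp h0mem)
        omega
    · have : (st.1.getD m 0 == 0) = false := by simp [hgd, hz]
      rw [this]
      simp only [Bool.false_eq_true, if_neg]
      exact ⟨hnd, hcase⟩
  · have hc' : st.1.contains m = false := by simpa using hc
    have hz := dict_getD_of_not_contains _ _ hc'
    simp only [hz, beq_self_eq_true, if_pos]
    have hitems' := dict_insert_of_not_contains st.1 m st.2 hc'
    have hkeys' : (st.1.insert m st.2).keys = st.1.keys ++ [m] := by
      simp [PySem.Dict.keys, hitems']
    have hvals' : (st.1.insert m st.2).values = st.1.values ++ [st.2] := by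
      simp [PySem.Dict.values, hitems']
    have hmem : m ∉ st.1.keys := fun hm => by simp [(dict_contains_iff_mem_keys _ _).2 hm] at hc
    have hlen : ((st.1.insert m st.2).items.length : Int) = (st.1.items.length : Int) + 1 := by
      rw [hitems']; simp [List.length_append]
    constructor
    · rw [hkeys']
      exact List.Nodup.append hnd (List.nodup_singleton m) (by simpa using hmem)
    · rcases hcase with ⟨hv, hord⟩ | ⟨hv, hord⟩
      · left
        constructor
        · have p1 : (st.1.insert m st.2).values.Perm (PySem.List.pyRange 0 (st.1.items.length : Int) 1 ++ [st.2]) := by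
            rw [hvals']; exact hv.append_right [st.2]
          rw [hlen]
          push_cast
          rw [PySem.List.pyRange_one_succ_right (a := 0) (b := (st.1.items.length : Int)) (by positivity)]
          refine p1.trans ?_
          rw [hord]
        · rw [hlen, hord]
      · right
        constructor
        · have p1 : (st.1.insert m st.2).values.Perm (PySem.List.pyRange 1 ((st.1.items.length : Int) + 1) 1 ++ [st.2]) := by
            rw [hvals']; exact hv.append_right [st.2]
          rw [hlen]
          push_cast
          have hs := PySem.List.pyRange_one_succ_right (a := 1) (b := (st.1.items.length : Int) + 1) (by omega)
          rw [hs]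
          refine p1.trans ?_
          rw [hord]
        · rw [hlen, hord]

theorem length_foldl_set {β : Type} (l : List (Nat × β)) (init : List β) :
    (l.foldl (fun acc p => acc.set p.1 p.2) init).length = init.length := by
  induction l generalizing init with
  | nil => rfl
  | cons p t ih => simp [List.foldl_cons, ih]

theorem getElem?_foldl_set_of_not_mem {β : Type} (l : List (Nat × β)) (init : List β) (i : Nat)
    (h : ∀ p ∈ l, p.1 ≠ i) :
    (l.foldl (fun acc p => acc.set p.1 p.2) init)[i]? = init[i]? := by
  induction l generalizing init with
  | nil => rfl
  | cons p t ih =>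
    rw [List.foldl_cons, ih _ (fun q hq => h q (List.mem_cons_of_mem p hq))]
    exact List.getElem?_set_ne (h p (List.mem_cons_self) )

theorem foldl_set_perm {β : Type} (l : List (Nat × β)) (n : Nat) (c : β)
    (hlen : l.length ≤ n) (hnd : (l.map Prod.fst).Nodup) (hin : ∀ p ∈ l, p.1 < n) :
    (l.foldl (fun acc p => acc.set p.1 p.2) (List.replicate n c)).Perm
      (l.map Prod.snd ++ List.replicate (n - l.length) c) := by
  induction l using List.reverseRecOn with
  | nil => simp
  | append_singleton t p ih =>
    have hlt : t.length < n := by simpa using hlen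
    have hndt : (t.map Prod.fst).Nodup := by
      rw [List.map_append] at hnd; exact (List.nodup_append.mp hnd).1
    have hint : ∀ q ∈ t, q.1 < n := fun q hq => hin q (by simp [hq])
    have hp1 : p.1 < n := hin p (by simp)
    have hfresh : ∀ q ∈ t, q.1 ≠ p.1 := by
      rw [List.map_append] at hnd
      intro q hq he
      rcases List.nodup_append.mp hnd with ⟨-, -, hdisj⟩
      exact hdisj q.1 (List.mem_map_of_mem hq) p.1 (by simp) he
    set prev := t.foldl (fun acc p => acc.set p.1 p.2) (List.replicate n c) with hprev
    have hplen : prev.length = n := by rw [hprev, length_foldl_set, List.length_replicate]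
    have hpc : prev[p.1]? = some c := by
      rw [hprev, getElem?_foldl_set_of_not_mem t _ p.1 hfresh]
      simp [hp1]
    have hpc' : prev[p.1]'(by omega) = c := by
      have := List.getElem?_eq_getElem (l := prev) (i := p.1) (by omega)
      rw [this] at hpc; exact Option.some.inj hpc
    rw [List.foldl_append, List.foldl_cons, List.foldl_nil, ← hprev]
    have hset : prev.set p.1 p.2 = prev.take p.1 ++ p.2 :: prev.drop (p.1+1) :=
      List.set_eq_take_cons_drop p.2 (by omega)
    have hsplit : prev = prev.take p.1 ++ c :: prev.drop (p.1+1) := by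
      conv_lhs => rw [← List.take_append_drop p.1 prev, List.drop_eq_getElem_cons (by omega : p.1 < prev.length)]
      rw [hpc']
    -- perms
    have e1 : (prev.set p.1 p.2).Perm (p.2 :: (prev.take p.1 ++ prev.drop (p.1+1))) := by
      rw [hset]; exact List.perm_middle
    have e2 : (c :: (prev.take p.1 ++ prev.drop (p.1+1))).Perm prev := by
      conv_rhs => rw [hsplit]
      exact List.perm_middle.symm
    have hk1 : 1 ≤ n - t.length := by omega
    have ihh := ih (by omega) hndt hint
    have e3 : (c :: (prev.take p.1 ++ prev.drop (p.1+1))).Perm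
        (c :: (t.map Prod.snd ++ List.replicate (n - t.length - 1) c)) := by
      refine (e2.trans ihh).trans ?_
      have : List.replicate (n - t.length) c = c :: List.replicate (n - t.length - 1) c := by
        rw [← List.replicate_succ]
        congr 1
        omega
      rw [this]
      exact List.perm_middle
    have e4 : (prev.take p.1 ++ prev.drop (p.1+1)).Perm
        (t.map Prod.snd ++ List.replicate (n - t.length - 1) c) := List.Perm.cons_inv e3
    refine e1.trans ?_
    have e5 : (p.2 :: (t.map Prod.snd ++ List.replicate (n - t.length - 1) c)).Perm
        ((t.map Prod.snd ++ [p.2]) ++ List.replicate (n - t.length - 1) c) := by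
      rw [List.append_assoc, List.singleton_append]
      exact List.perm_middle.symm
    refine (e4.cons p.2).trans (e5.trans ?_)
    rw [List.map_append]
    simp only [List.map_cons, List.map_nil, List.length_append, List.length_cons, List.length_nil]
    have : n - (t.length + 1) = n - t.length - 1 := by omega
    rw [this]

def normIdx (n : Nat) (v : Int) : Nat := if v = 0 then n - 1 else (v - 1).toNat

theorem pySetD_norm {β : Type} (acc : List β) (v : Int) (k : β)
    (h0 : 0 ≤ v) (h1 : v ≤ (acc.length : Int)) :
    PySem.List.pySetD acc (v - 1) k = acc.set (normIdx acc.length v) k := by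
  unfold normIdx
  by_cases hv : v = 0
  · subst hv
    simp only [PySem.List.pySetD, PySem.List.pySet?, PySem.List.pyIdx?]
    norm_num
    by_cases hn : acc.length = 0
    · rw [List.eq_nil_iff_length_eq_zero.mpr hn]; simp
    · rw [if_pos (by omega : 1 ≤ acc.length)]; simp
  · have hv1 : 1 ≤ v := by omega
    simp only [PySem.List.pySetD, PySem.List.pySet?, PySem.List.pyIdx?]
    rw [if_neg hv, if_pos (by omega)]
    by_cases hlt : v - 1 < (acc.length : Int)
    · rw [if_pos hlt]; simp
    · rw [if_neg hlt]
      simp only [Option.getD_none, Option.map_none]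
      rw [List.set_eq_of_length_le]
      omega

theorem fold_pySetD_eq_fold_set {β : Type} (l : List (β × Int)) (acc : List β) (n : Nat)
    (hacc : acc.length = n) (hb : ∀ p ∈ l, 0 ≤ p.2 ∧ p.2 ≤ (n : Int)) :
    l.foldl (fun acc p => PySem.List.pySetD acc (p.2 - 1) p.1) acc
      = (l.map (fun p => (normIdx n p.2, p.1))).foldl (fun acc q => acc.set q.1 q.2) acc := by
  induction l generalizing acc with
  | nil => rfl
  | cons p t ih =>
    rw [List.foldl_cons, List.map_cons, List.foldl_cons]
    have hp := hb p (List.mem_cons_self)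
    rw [← hacc] at hp
    rw [pySetD_norm acc p.2 p.1 hp.1 hp.2, hacc]
    exact ih _ (by simp [hacc]) (fun q hq => hb q (List.mem_cons_of_mem p hq))

theorem final_perm (st : PySem.Dict (List Char) Int × Int) (h : INV st) :
    (st.1.keys.foldl (fun acc m => PySem.List.pySetD acc (st.1.getD m 0 - 1) m)
        ((PySem.List.pyRange 0 (st.1.items.length : Int) 1).foldl (fun acc _ => acc ++ [['0']]) [])).Perm
      st.1.keys := by
  obtain ⟨hnd, hcase⟩ := h
  set K := st.1.items.length with hK
  have hinit : (PySem.List.pyRange 0 (K : Int) 1).foldl (fun acc _ => acc ++ [['0']]) []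
      = List.replicate K ['0'] := by
    rw [PySem.List.foldl_append_singleton_eq_map (f := fun _ => (['0'] : List Char))]
    rw [List.map_const']
    rw [PySem.List.length_pyRange_one]
    simp
  rw [hinit]
  have hkf : st.1.keys.foldl (fun acc m => PySem.List.pySetD acc (st.1.getD m 0 - 1) m) (List.replicate K ['0'])
      = st.1.items.foldl (fun acc p => PySem.List.pySetD acc (p.2 - 1) p.1) (List.replicate K ['0']) := by
    conv_rhs => rw [PySem.Dict.items_eq_map_keys st.1 hnd 0]
    rw [List.foldl_map]
  rw [hkf]
  have hstrict : (∀ v ∈ st.1.values, 0 ≤ v ∧ v < (K : Int)) ∨ (∀ v ∈ st.1.values, 1 ≤ v ∧ v ≤ (K : Int)) := by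
    rcases hcase with ⟨hp, -⟩ | ⟨hp, -⟩
    · left
      intro v hv
      have := PySem.List.mem_pyRange_one.mp (hp.mem_iff.mp hv)
      omega
    · right
      intro v hv
      have := PySem.List.mem_pyRange_one.mp (hp.mem_iff.mp hv)
      omega
  have hvmem : ∀ v ∈ st.1.values, 0 ≤ v ∧ v ≤ (K : Int) := by
    intro v hv
    rcases hstrict with hs | hs <;> · have := hs v hv; omega
  have hb : ∀ p ∈ st.1.items, 0 ≤ p.2 ∧ p.2 ≤ (K : Int) := by
    intro p hp
    refine hvmem p.2 ?_
    simp only [PySem.Dict.values]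
    exact List.mem_map_of_mem hp
  rw [fold_pySetD_eq_fold_set st.1.items (List.replicate K ['0']) K (by simp) hb]
  have hlen' : (st.1.items.map (fun p => (normIdx K p.2, p.1))).length = K := by simp [hK]
  have hfst : (st.1.items.map (fun p => (normIdx K p.2, p.1))).map Prod.fst
      = st.1.values.map (normIdx K) := by
    simp [PySem.Dict.values, List.map_map]
  have hinj : ∀ a ∈ st.1.values, ∀ b ∈ st.1.values, normIdx K a = normIdx K b → a = b := by
    intro a ha b hb' he
    unfold normIdx at he
    rcases hstrict with hs | hs
    · have h1 := hs a ha
      have h2 := hs b hb'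
      split_ifs at he <;> omega
    · have h1 := hs a ha
      have h2 := hs b hb'
      split_ifs at he <;> omega
  have hvnd : st.1.values.Nodup := by
    rcases hcase with ⟨hp, -⟩ | ⟨hp, -⟩ <;> exact hp.nodup_iff.mpr (PySem.List.nodup_pyRange_one _ _)
  have hnd' : ((st.1.items.map (fun p => (normIdx K p.2, p.1))).map Prod.fst).Nodup := by
    rw [hfst]
    exact (List.nodup_map_iff_inj_on hvnd).mpr hinj
  have hin : ∀ q ∈ st.1.items.map (fun p => (normIdx K p.2, p.1)), q.1 < K := by
    intro q hq
    rw [List.mem_map] at hq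
    obtain ⟨p, hp, rfl⟩ := hq
    have h1 := hb p hp
    have h2 : 0 < K := by
      have : st.1.items ≠ [] := fun he => by simp [he] at hp
      have h3 := List.length_pos_iff.mpr this
      omega
    unfold normIdx
    split_ifs <;> omega
  have hperm := foldl_set_perm (st.1.items.map (fun p => (normIdx K p.2, p.1))) K ['0']
    (le_of_eq hlen') hnd' hin
  refine hperm.trans ?_
  have hsnd : (st.1.items.map (fun p => (normIdx K p.2, p.1))).map Prod.snd = st.1.keys := by
    simp [PySem.Dict.keys, List.map_map]
  rw [hlen', Nat.sub_self, List.replicate_zero, List.append_nil, hsnd]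

theorem stream_keys (L : List (List Char)) (P : List Char → Prop) [DecidablePred P]
    (st : PySem.Dict (List Char) Int × Int) :
    (L.foldl (fun st m => if P m then stepA st m else st) st).1.keys
      = L.foldl (fun s m => if P m then PySem.Set.add s m else s) st.1.keys := by
  induction L generalizing st with
  | nil => rfl
  | cons m t ih =>
    rw [List.foldl_cons, List.foldl_cons]
    by_cases hP : P m
    · rw [if_pos hP, if_pos hP, ih, stepA_keys]
    · rw [if_neg hP, if_neg hP, ih]

theorem stream_INV (L : List (List Char)) (P : List Char → Prop) [DecidablePred P]
    (st : PySem.Dict (List Char) Int × Int) (h : INV st) :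
    INV (L.foldl (fun st m => if P m then stepA st m else st) st) := by
  induction L generalizing st with
  | nil => exact h
  | cons m t ih =>
    rw [List.foldl_cons]
    by_cases hP : P m
    · rw [if_pos hP]; exact ih _ (stepA_INV st m h)
    · rw [if_neg hP]; exact ih _ h



theorem sorted_eq_of_perm_charlists (xs ys : List (List Char)) (hp : xs.Perm ys) :
    PySem.List.sorted xs (fun x => x) false = PySem.List.sorted ys (fun x => x) false := by
  have h := PySem.List.sorted_eq_sorted_of_perm xs ys (fun a => a) (fun a b h => h) hp
  convert h using 2

theorem wordfrequency_eq_fold (W : List Char) (cs : Int) :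
    wordfrequency W cs
      = (kmersOf W cs).foldl (fun d k => if d.getD k 0 == 0 then d.insert k (countKmers W k) else d)
          PySem.Dict.empty := by
  unfold wordfrequency kmersOf
  rw [List.foldl_map]

theorem wordfrequency_items (W : List Char) (cs : Int) (hcs : 0 ≤ cs) :
    (wordfrequency W cs).items
      = (PySem.Set.ofList (kmersOf W cs)).map (fun k => (k, countKmers W k)) := by
  have hv : ∀ k ∈ kmersOf W cs, countKmers W k ≠ 0 := by
    intro k hk
    rw [countKmers_eq_count W cs k (length_mem_kmersOf W cs hcs k hk)]
    have := List.count_pos_iff.mpr hk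
    omega
  rw [wordfrequency_eq_fold]
  exact condInsert_items _ _ hv

theorem window_lemma (W : List Char) (cs ms : Int) (hcs : 0 ≤ cs)
    (st : PySem.Dict (List Char) Int × Int) (hinv : INV st) :
    ((wordfrequency W cs).keys.foldl (fun st m =>
        if (wordfrequency W cs).getD m 0 ≥ ms then
          if st.1.getD m 0 == 0 then (st.1.insert m st.2, st.2 + 1) else st
        else st) st).1.keys
      = (PySem.Dict.counter (kmersOf W cs)).items.foldl
          (fun s p => if p.2 ≥ ms then PySem.Set.add s p.1 else s) st.1.keys
    ∧ INV ((wordfrequency W cs).keys.foldl (fun st m =>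
        if (wordfrequency W cs).getD m 0 ≥ ms then
          if st.1.getD m 0 == 0 then (st.1.insert m st.2, st.2 + 1) else st
        else st) st) := by
  have hitems := wordfrequency_items W cs hcs
  have hkeys : (wordfrequency W cs).keys = PySem.Set.ofList (kmersOf W cs) := by
    simp only [PySem.Dict.keys, hitems, List.map_map]
    exact List.map_id _
  have hgd : ∀ m ∈ PySem.Set.ofList (kmersOf W cs),
      (wordfrequency W cs).getD m 0 = ((kmersOf W cs).count m : Int) := by
    intro m hm
    rw [getD_items_map _ _ _ 0 hitems m, if_pos hm,
        countKmers_eq_count W cs m (length_mem_kmersOf W cs hcs m ((PySem.Set.mem_ofList _ m).1 hm))]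
  have hA : (wordfrequency W cs).keys.foldl (fun st m =>
        if (wordfrequency W cs).getD m 0 ≥ ms then
          if st.1.getD m 0 == 0 then (st.1.insert m st.2, st.2 + 1) else st
        else st) st
      = (PySem.Set.ofList (kmersOf W cs)).foldl
          (fun st m => if ((kmersOf W cs).count m : Int) ≥ ms then stepA st m else st) st := by
    rw [hkeys]
    apply PySem.List.foldl_congr_mem
    intro acc m hm
    rw [hgd m hm]
    rfl
  have hB : (PySem.Dict.counter (kmersOf W cs)).items.foldl
        (fun s p => if p.2 ≥ ms then PySem.Set.add s p.1 else s) st.1.keys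
      = (PySem.Set.ofList (kmersOf W cs)).foldl
          (fun s m => if ((kmersOf W cs).count m : Int) ≥ ms then PySem.Set.add s m else s) st.1.keys := by
    rw [PySem.Dict.items_counter, List.foldl_map]
  rw [hA, hB]
  exact ⟨stream_keys _ _ st, stream_INV _ _ st hinv⟩

theorem outer_lemma (g : List Char) (cs ws ms : Int) (hcs : 0 ≤ cs) (ns : List Int)
    (st : PySem.Dict (List Char) Int × Int) (hinv : INV st) :
    (ns.foldl (fun st n =>
        (wordfrequency (PySem.List.slice g (some n) (some (n + ws))) cs).keys.foldl (fun st m =>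
          if (wordfrequency (PySem.List.slice g (some n) (some (n + ws))) cs).getD m 0 ≥ ms then
            if st.1.getD m 0 == 0 then (st.1.insert m st.2, st.2 + 1) else st
          else st) st) st).1.keys
      = ns.foldl (fun s n =>
          (PySem.Dict.counter (kmersOf (PySem.List.slice g (some n) (some (n + ws))) cs)).items.foldl
            (fun s p => if p.2 ≥ ms then PySem.Set.add s p.1 else s) s) st.1.keys
    ∧ INV (ns.foldl (fun st n =>
        (wordfrequency (PySem.List.slice g (some n) (some (n + ws))) cs).keys.foldl (fun st m =>
          if (wordfrequency (PySem.List.slice g (some n) (some (n + ws))) cs).getD m 0 ≥ ms then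
            if st.1.getD m 0 == 0 then (st.1.insert m st.2, st.2 + 1) else st
          else st) st) st) := by
  induction ns generalizing st with
  | nil => exact ⟨rfl, hinv⟩
  | cons n t ih =>
    rw [List.foldl_cons, List.foldl_cons]
    obtain ⟨h1, h2⟩ := window_lemma (PySem.List.slice g (some n) (some (n + ws))) cs ms hcs st hinv
    obtain ⟨h3, h4⟩ := ih _ h2
    rw [h3, h1]
    exact ⟨rfl, h4⟩

theorem INV_empty : INV (PySem.Dict.empty, 0) := by
  constructor
  · simp [PySem.Dict.empty, PySem.Dict.keys]
  · left
    constructor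
    · simp [PySem.Dict.empty, PySem.Dict.values, PySem.List.pyRange_one_eq_nil]
    · simp [PySem.Dict.empty]

-- ===== VERDICT (by name: the statement is the Claim_ definition above) =====
theorem clumpfinder_spec : Claim_equal_clumpfinder := by
  intro gene cs ws ms hdom hpre
  unfold Spec_clumpfinder clumpfinder clumpfinder_alt
  simp only []
  obtain ⟨hkeys, hinv⟩ := outer_lemma gene.toList cs ws ms hpre
    (PySem.List.pyRange 0 ((gene.toList.length : Int) + 1 - ws) 1) (PySem.Dict.empty, 0) INV_empty
  apply congrArg
  apply sorted_eq_of_perm_charlists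
  have hperm := final_perm _ hinv
  refine hperm.trans ?_
  rw [hkeys]
  have hBfun : ∀ (s : PySem.Set (List Char)) (n : Int),
      ((PySem.List.pyRange 0 (((PySem.List.slice gene.toList (some n) (some (n + ws))).length : Int) + 1 - cs) 1).foldl
        (fun (d : PySem.Dict (List Char) Int) j =>
          d.insert (PySem.List.slice (PySem.List.slice gene.toList (some n) (some (n + ws))) (some j) (some (j + cs)))
            (d.getD (PySem.List.slice (PySem.List.slice gene.toList (some n) (some (n + ws))) (some j) (some (j + cs))) 0 + 1))
        PySem.Dict.empty).items.foldl
        (fun s p => if p.2 ≥ ms then PySem.Set.add s p.1 else s) s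
      = (PySem.Dict.counter (kmersOf (PySem.List.slice gene.toList (some n) (some (n + ws))) cs)).items.foldl
          (fun s p => if p.2 ≥ ms then PySem.Set.add s p.1 else s) s := by
    intro s n
    rw [counts_eq_counter]
  have : (PySem.Dict.empty : PySem.Dict (List Char) Int).keys = PySem.Set.empty := rfl
  rw [this]
  apply List.Perm.of_eq
  exact PySem.List.foldl_congr_mem _ _ _ _ (fun s n _ => (hBfun s n).symm)
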